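-- pv_equiv track=rewrite | github.com/Yann-Situ/ProgDivers | gen_picross.py | compute_column
-- ===== SOURCE A (Python) =====
-- def compute_column(mat, j, n):
--     v = []
--     temp=0
--     for i in range(n):
--         if mat[i][j] == 1:
--             temp +=1
--         elif temp != 0:
--             v.append(temp)
--             temp = 0
--     if temp != 0:
--         v.append(temp)
--     return v
-- ===== SOURCE B (Python) =====
-- def compute_column(mat, j, n):
--     # Separator positions (entries != 1) with sentinels -1 and n; the maximal
--     # runs of 1s are exactly the gaps between consecutive separators.
--     seps = [-1] + [i for i in range(n) if mat[i][j] != 1] + [n]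
--     return [b - a - 1 for a, b in zip(seps, seps[1:]) if b - a > 1]
-- ===== Notes on version B (the rewrite author's own statement) =====
-- stated objective: alternative
-- what changed: Replaces A's running-counter/flush state machine with a separator-and-gaps method: collect the positions of non-1 entries with sentinels -1 and n, then the run lengths are the gaps b-a-1 between consecutive separators that are positive.
import Mathlib
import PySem

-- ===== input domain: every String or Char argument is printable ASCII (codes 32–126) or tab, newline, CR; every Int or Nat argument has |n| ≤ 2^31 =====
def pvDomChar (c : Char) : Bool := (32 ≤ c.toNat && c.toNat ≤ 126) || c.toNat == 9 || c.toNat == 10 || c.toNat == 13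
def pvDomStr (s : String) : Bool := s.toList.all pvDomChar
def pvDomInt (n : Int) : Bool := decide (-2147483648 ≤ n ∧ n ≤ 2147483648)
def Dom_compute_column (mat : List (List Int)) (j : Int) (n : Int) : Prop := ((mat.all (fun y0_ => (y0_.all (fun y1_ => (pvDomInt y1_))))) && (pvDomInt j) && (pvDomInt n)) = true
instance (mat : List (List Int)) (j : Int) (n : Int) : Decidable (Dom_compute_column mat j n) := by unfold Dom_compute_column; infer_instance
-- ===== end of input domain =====

-- B replaces A's running-counter/flush state machine by a separator-and-gaps method:
-- collect the positions of non-1 entries with sentinels -1 and n; the run lengths of 1s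
-- are the positive gaps b-a-1 between consecutive separators (alternative algorithm, same cost).

-- shared helper: mat[i][j] (total with defaults; Pre_ excludes the raising indices)
def pvGetIJ (mat : List (List Int)) (i j : Int) : Int :=
  PySem.List.pyGetD (PySem.List.pyGetD mat i []) j 0

-- ===== PORT A =====
def pvStep (s : List Int × Int) (x : Int) : List Int × Int :=
  if x = 1 then (s.1, s.2 + 1) else if s.2 ≠ 0 then (s.1 ++ [s.2], 0) else s

def compute_column (mat : List (List Int)) (j : Int) (n : Int) : List Int :=
  let s := (PySem.List.pyRange 0 n 1).foldl (fun s i => pvStep s (pvGetIJ mat i j)) ([], 0)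
  if s.2 ≠ 0 then s.1 ++ [s.2] else s.1

-- ===== PORT B =====
def compute_column_alt (mat : List (List Int)) (j : Int) (n : Int) : List Int :=
  let seps : List Int :=
    [-1] ++ (PySem.List.pyRange 0 n 1).filter (fun i => pvGetIJ mat i j ≠ 1) ++ [n]
  ((seps.zip (PySem.List.slice seps (some 1) none)).filter
      (fun p => p.2 - p.1 > 1)).map (fun p => p.2 - p.1 - 1)

-- ===== PRECONDITION & SPEC =====
-- Pre_ excludes exactly the inputs on which Python A raises IndexError:
-- n beyond the number of rows, or a column index j out of range for some accessed row.
def Pre_compute_column (mat : List (List Int)) (j : Int) (n : Int) : Prop :=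
  n ≤ (mat.length : Int) ∧
    ∀ i ∈ PySem.List.pyRange 0 (min n (mat.length : Int)) 1,
      (PySem.List.pyGet? (PySem.List.pyGetD mat i []) j).isSome = true
instance (mat : List (List Int)) (j : Int) (n : Int) : Decidable (Pre_compute_column mat j n) := by
  unfold Pre_compute_column; infer_instance

def pvWitness_compute_column : List (List Int) × Int × Int := ([[1, 0], [1, 1], [0, 1]], 0, 3)

def Spec_compute_column (mat : List (List Int)) (j : Int) (n : Int) (out : List Int) : Prop := out = compute_column_alt mat j n
instance (mat : List (List Int)) (j : Int) (n : Int) (out : List Int) : Decidable (Spec_compute_column mat j n out) := by unfold Spec_compute_column; infer_instance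

-- ===== CLAIM (what is proved, stated in full; the proofs are below) =====
def Claim_equal_compute_column : Prop := ∀ (mat : List (List Int)) (j : Int) (n : Int), Dom_compute_column mat j n → Pre_compute_column mat j n → Spec_compute_column mat j n (compute_column mat j n)

-- ===== LEMMAS AND PROOFS =====

-- A's loop as a recursion over the (already extracted) column values
def loopA : List Int → List Int → Int → List Int
  | [], v, t => if t ≠ 0 then v ++ [t] else v
  | x :: xs, v, t =>
    if x = 1 then loopA xs v (t + 1)
    else if t ≠ 0 then loopA xs (v ++ [t]) 0 else loopA xs v t

theorem foldl_comp : ∀ (l : List Int) (g : Int → Int) (s : List Int × Int),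
    l.foldl (fun s i => pvStep s (g i)) s = (l.map g).foldl pvStep s
  | [], _, _ => rfl
  | x :: xs, g, s => by simp only [List.foldl, List.map]; exact foldl_comp xs g _

theorem foldl_pvStep_eq_loopA : ∀ (col v : List Int) (t : Int),
    (if (col.foldl pvStep (v, t)).2 ≠ 0 then (col.foldl pvStep (v, t)).1 ++ [(col.foldl pvStep (v, t)).2]
     else (col.foldl pvStep (v, t)).1) = loopA col v t
  | [], v, t => by simp [loopA]
  | x :: xs, v, t => by
    simp only [List.foldl, loopA, pvStep]
    by_cases hx : x = 1
    · simp [hx, foldl_pvStep_eq_loopA xs v (t + 1)]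
    · by_cases ht : t ≠ 0
      · simp [hx, ht, foldl_pvStep_eq_loopA xs (v ++ [t]) 0]
      · simp [hx, ht, foldl_pvStep_eq_loopA xs v t]

theorem loopA_append : ∀ (col v : List Int) (t : Int), loopA col v t = v ++ loopA col [] t
  | [], v, t => by by_cases ht : t ≠ 0 <;> simp [loopA, ht]
  | x :: xs, v, t => by
    simp only [loopA]
    by_cases hx : x = 1
    · simp [hx, loopA_append xs v (t + 1)]
    · by_cases ht : t ≠ 0
      · rw [if_neg hx, if_neg hx, if_pos ht, if_pos ht,
            loopA_append xs (v ++ [t]) 0, loopA_append xs ([] ++ [t]) 0]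
        simp
      · simp [hx, ht, loopA_append xs v t]

-- gaps after previous separator a: one entry b-a-1 per consecutive pair with gap > 1
def gapsG (a : Int) : List Int → List Int
  | [] => []
  | b :: rest => (if b - a > 1 then [b - a - 1] else []) ++ gapsG b rest

-- B's zip/filter/map over (a :: l) computes exactly gapsG a l
theorem zip_gaps (a : Int) : ∀ l : List Int,
    (((a :: l).zip l).filter (fun p => p.2 - p.1 > 1)).map (fun p => p.2 - p.1 - 1)
      = gapsG a l
  | [] => rfl
  | b :: rest => by
    have ih := zip_gaps b rest
    simp only [List.zip_cons_cons, List.filter_cons, gapsG]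
    by_cases h : b - a > 1
    · simp only [h, decide_true]
      simpa using ih
    · simp only [h, decide_false]
      simpa using ih

-- main invariant: A's machine with run counter t = i - a - 1 equals the gaps of the
-- separators of the next m entries (indices i, i+1, …) followed by the end sentinel
theorem loopA_eq_gaps (g : Int → Int) :
    ∀ (m : Nat) (i a t : Int), t = i - a - 1 → 0 ≤ t →
    loopA ((PySem.List.pyRange i (i + m) 1).map g) [] t
      = gapsG a ((PySem.List.pyRange i (i + m) 1).filter (fun x => g x ≠ 1) ++ [i + m])
  | 0, i, a, t, hta, ht => by
    rw [PySem.List.pyRange_one_eq_nil (by omega)]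
    by_cases h : t = 0
    · simp [loopA, gapsG, h]; omega
    · simp only [List.map_nil, loopA, if_pos h, List.filter_nil, List.nil_append, gapsG]
      rw [if_pos (by omega : i + (0:Nat) - a > 1)]
      simp; omega
  | m + 1, i, a, t, hta, ht => by
    rw [PySem.List.pyRange_one_cons (by omega : i < i + (m + 1 : Nat))]
    have hsh : i + ((m + 1 : Nat) : Int) = (i + 1) + (m : Nat) := by push_cast; ring
    simp only [List.map_cons, List.filter_cons, loopA]
    by_cases hx : g i = 1
    · rw [if_pos hx]
      have := loopA_eq_gaps g m (i + 1) a (t + 1) (by omega) (by omega)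
      rw [hsh, this]
      simp [hx]
    · rw [if_neg hx]
      have h0 := loopA_eq_gaps g m (i + 1) i 0 (by omega) le_rfl
      by_cases h : t ≠ 0
      · rw [if_pos h, loopA_append, hsh, h0]
        simp only [hx, ne_eq, not_false_eq_true, decide_true, if_true, List.cons_append, gapsG]
        rw [if_pos (by omega : i - a > 1)]
        simp; omega
      · rw [if_neg h, hsh]
        have hteq : t = 0 := by omega
        rw [hteq, h0]
        simp only [hx, ne_eq, not_false_eq_true, decide_true, if_true, List.cons_append, gapsG]
        rw [if_neg (by omega : ¬ i - a > 1)]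
        simp

-- ===== VERDICT (by name: the statement is the Claim_ definition above) =====
theorem compute_column_spec : Claim_equal_compute_column := by
  intro mat j n _hdom _hpre
  simp only [Spec_compute_column, compute_column, compute_column_alt,
    PySem.List.slice_from_one]
  rw [foldl_comp, foldl_pvStep_eq_loopA]
  by_cases hn : 0 ≤ n
  · have hrange : PySem.List.pyRange 0 n 1 = PySem.List.pyRange 0 (0 + (n.toNat : Int)) 1 := by
      congr 1; omega
    rw [hrange, loopA_eq_gaps (fun i => pvGetIJ mat i j) n.toNat 0 (-1) 0 (by omega) le_rfl]
    have : (0 : Int) + (n.toNat : Int) = n := by omega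
    rw [this]
    simp only [List.cons_append, List.tail_cons]
    rw [← zip_gaps (-1)]
    simp
  · rw [PySem.List.pyRange_one_eq_nil (by omega)]
    simp [loopA]
    omega
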